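-- pv_equiv track=rewrite | github.com/WT-InfoSec/Route-Cipher | routeCipher.py | getStringWithUppers
-- ===== SOURCE A (Python) =====
-- def getStringWithUppers(grid):
-- 	gridWidth = len(grid)
-- 	output = ""
-- 	for col in range(gridWidth):
-- 		for row in range(gridWidth):
-- 			current = grid[row][col]
-- 			if (current.isupper()):
-- 				output += current
-- 	return output
-- ===== SOURCE B (Python) =====
-- def getStringWithUppers(grid):
-- 	n = len(grid)
-- 	buckets = [[] for _ in range(n)]
-- 	for row in range(n):
-- 		for col in range(n):
-- 			current = grid[row][col]
-- 			if current.isupper():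
-- 				buckets[col].append(current)
-- 	return ''.join(''.join(b) for b in buckets)
-- ===== Notes on version B (the rewrite author's own statement) =====
-- stated objective: alternative
-- what changed: A concatenates a string column-by-column with the column loop outermost; B makes one row-major pass that appends each uppercase cell into a per-column bucket list and joins the buckets once at the end.
import Mathlib
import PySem

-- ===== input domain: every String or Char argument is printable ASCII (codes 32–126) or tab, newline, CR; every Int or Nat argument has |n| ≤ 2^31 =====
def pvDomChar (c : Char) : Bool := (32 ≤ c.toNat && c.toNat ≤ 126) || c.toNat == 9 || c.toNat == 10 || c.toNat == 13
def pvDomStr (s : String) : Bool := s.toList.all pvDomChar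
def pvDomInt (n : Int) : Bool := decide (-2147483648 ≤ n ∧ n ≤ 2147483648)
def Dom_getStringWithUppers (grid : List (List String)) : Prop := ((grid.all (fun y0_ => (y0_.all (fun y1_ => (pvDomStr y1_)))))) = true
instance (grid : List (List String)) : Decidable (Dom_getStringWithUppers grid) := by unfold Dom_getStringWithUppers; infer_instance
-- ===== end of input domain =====

-- B replaces A's column-major string concatenation by a single row-major pass into per-column
-- bucket lists joined once at the end (alternative decomposition; a timing run measured it
-- moderately faster, as it avoids repeated string concatenation).

-- Python str.isupper(): at least one cased character and no lowercase one (exact on ASCII).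
def pvIsupperStr (s : String) : Bool :=
  (s.toList.any (fun c => PySem.Chars.isupper c || PySem.Chars.islower c)) &&
  (s.toList.all (fun c => !PySem.Chars.islower c))

-- ===== PORT A =====
def getStringWithUppers (grid : List (List String)) : String :=
  let gridWidth : Int := grid.length
  (PySem.List.pyRange 0 gridWidth 1).foldl (fun output col =>
    (PySem.List.pyRange 0 gridWidth 1).foldl (fun output row =>
      let current := PySem.List.pyGetD (PySem.List.pyGetD grid row []) col ""
      if pvIsupperStr current then output ++ current else output) output) ""

-- ===== PORT B =====
def getStringWithUppers_alt (grid : List (List String)) : String :=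
  let n : Int := grid.length
  let buckets : List (List String) := (PySem.List.pyRange 0 n 1).map (fun _ => [])
  let final := (PySem.List.pyRange 0 n 1).foldl (fun bs row =>
    (PySem.List.pyRange 0 n 1).foldl (fun bs col =>
      let current := PySem.List.pyGetD (PySem.List.pyGetD grid row []) col ""
      if pvIsupperStr current then bs.modify col.toNat (· ++ [current]) else bs) bs) buckets
  PySem.Str.join "" (final.map (fun b => PySem.Str.join "" b))

-- ===== PRECONDITION & SPEC =====
-- Python A raises IndexError iff some row is shorter than the grid's height; Pre_ excludes exactly those grids.
def Pre_getStringWithUppers (grid : List (List String)) : Prop :=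
  ∀ r ∈ grid, grid.length ≤ r.length
-- (purely a shape condition: whether a cell passes the isUpper test — e.g. cells like "AB" or
-- "MixedCase" — never affects whether A raises, only which characters reach the output)
instance (grid : List (List String)) : Decidable (Pre_getStringWithUppers grid) := by
  unfold Pre_getStringWithUppers; infer_instance
def pvWitness_getStringWithUppers : List (List String) := [["A", "b"], ["c", "D"]]

def Spec_getStringWithUppers (grid : List (List String)) (out : String) : Prop := out = getStringWithUppers_alt grid
instance (grid : List (List String)) (out : String) : Decidable (Spec_getStringWithUppers grid out) := by unfold Spec_getStringWithUppers; infer_instance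

-- ===== CLAIM (what is proved, stated in full; the proofs are below) =====
def Claim_equal_getStringWithUppers : Prop := ∀ (grid : List (List String)), Dom_getStringWithUppers grid → Pre_getStringWithUppers grid → Spec_getStringWithUppers grid (getStringWithUppers grid)

-- ===== LEMMAS AND PROOFS =====

-- the defaulted cell read both ports perform
def pvCell (grid : List (List String)) (r c : Nat) : String := (grid.getD r []).getD c ""
-- the characters a cell contributes
def pvPick (grid : List (List String)) (r c : Nat) : List Char :=
  if pvIsupperStr (pvCell grid r c) then (pvCell grid r c).toList else []
-- the bucket entry a cell contributes in B
def pvGr (grid : List (List String)) (r c : Nat) : List String :=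
  if pvIsupperStr (pvCell grid r c) then [pvCell grid r c] else []

theorem pv_join_nil (l : List (List Char)) : PySem.Chars.join [] l = l.flatten := by
  show List.intercalate [] l = l.flatten
  induction l with
  | nil => rfl
  | cons a t ih =>
    cases t with
    | nil => simp [List.intercalate]
    | cons b u => simp_all [List.intercalate, List.intersperse]

-- generic: a foldl whose step appends h x (as characters) to the accumulator
theorem pv_foldl_str {α : Type} (l : List α) (h : α → List Char) (g : String → α → String)
    (hg : ∀ o x, (g o x).toList = o.toList ++ h x) :
    ∀ out : String, (l.foldl g out).toList = out.toList ++ l.flatMap h := by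
  induction l with
  | nil => intro out; simp
  | cons a t ih => intro out; simp only [List.foldl_cons, List.flatMap_cons]
                   rw [ih, hg]; simp

theorem pv_selfmap (bs : List (List String)) :
    (List.range bs.length).map (fun c => bs.getD c []) = bs := by
  apply List.ext_getElem
  · simp
  · intro i h1 h2
    simp only [List.getElem_map, List.getElem_range]
    rw [List.getD_eq_getElem bs [] h2]

theorem pv_modify_map_range {β : Type} (f : Nat → β) (g : β → β) (n m : Nat) (hm : m < n) :
    ((List.range n).map f).modify m g = (List.range n).map (fun c => if m = c then g (f c) else f c) := by
  apply List.ext_getElem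
  · simp
  · intro i h1 h2
    rw [List.getElem_modify]
    simp

theorem pv_binner (grid : List (List String)) (r : Nat) :
    ∀ (m : Nat) (bs : List (List String)), bs.length = grid.length → m ≤ grid.length →
    (List.range m).foldl
        (fun bs c => if pvIsupperStr (pvCell grid r c) then bs.modify c (· ++ [pvCell grid r c]) else bs) bs
      = (List.range grid.length).map
          (fun c => if c < m then bs.getD c [] ++ pvGr grid r c else bs.getD c []) := by
  intro m
  induction m with
  | zero =>
    intro bs hlen _
    simp only [List.range_zero, List.foldl_nil, Nat.not_lt_zero, if_false]
    rw [← hlen, pv_selfmap]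
  | succ m ih =>
    intro bs hlen hm
    rw [List.range_succ, List.foldl_append, ih bs hlen (Nat.le_of_succ_le hm)]
    simp only [List.foldl_cons, List.foldl_nil]
    by_cases hp : pvIsupperStr (pvCell grid r m)
    · rw [if_pos hp, pv_modify_map_range _ _ _ m (by omega)]
      apply List.map_congr_left
      intro c hc
      have hcn : c < grid.length := List.mem_range.mp hc
      by_cases hcm : c = m
      · subst hcm
        simp [pvGr, hp]
      · split_ifs <;> simp_all <;> omega
    · rw [if_neg hp]
      apply List.map_congr_left
      intro c hc
      by_cases hcm : c = m
      · subst hcm; simp [pvGr, hp]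
      · split_ifs <;> simp_all <;> omega

theorem pv_bouter (grid : List (List String)) :
    ∀ (m : Nat), m ≤ grid.length →
    (List.range m).foldl
        (fun bs r => (List.range grid.length).foldl
          (fun bs c => if pvIsupperStr (pvCell grid r c) then bs.modify c (· ++ [pvCell grid r c]) else bs) bs)
        ((List.range grid.length).map (fun _ => ([] : List String)))
      = (List.range grid.length).map (fun c => (List.range m).flatMap (fun r => pvGr grid r c)) := by
  intro m
  induction m with
  | zero => simp
  | succ m ih =>
    intro hm
    rw [List.range_succ, List.foldl_append, ih (Nat.le_of_succ_le hm)]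
    simp only [List.foldl_cons, List.foldl_nil]
    rw [pv_binner grid m grid.length _ (by simp) le_rfl]
    apply List.map_congr_left
    intro c hc
    have hcn : c < grid.length := List.mem_range.mp hc
    rw [if_pos hcn, PySem.List.getD_map_range _ _ _ _ hcn]
    simp [List.flatMap_append]

theorem pv_A_chars (grid : List (List String)) :
    (getStringWithUppers grid).toList
      = (List.range grid.length).flatMap
          (fun c => (List.range grid.length).flatMap (fun r => pvPick grid r c)) := by
  unfold getStringWithUppers
  simp only [PySem.List.pyRange_zero_nat, List.foldl_map, PySem.List.pyGetD_natCast]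
  rw [pv_foldl_str _ (fun c => (List.range grid.length).flatMap (fun r => pvPick grid r c))]
  · simp
  · intro o c
    rw [pv_foldl_str _ (fun r => pvPick grid r c)]
    intro o' r
    simp only [pvPick, pvCell, List.getD_eq_getElem?_getD]
    split <;> simp

theorem pv_col (grid : List (List String)) (c : Nat) (l : List Nat) :
    (List.map String.toList (List.flatMap (fun r => pvGr grid r c) l)).flatten
      = List.flatMap (fun r => pvPick grid r c) l := by
  induction l with
  | nil => rfl
  | cons a t ih =>
    simp only [List.flatMap_cons, List.map_append, List.flatten_append, ih]
    by_cases hp : pvIsupperStr (pvCell grid a c)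
    · simp [pvGr, pvPick, hp]
    · simp [pvGr, pvPick, hp]

theorem pv_B_chars (grid : List (List String)) :
    (getStringWithUppers_alt grid).toList
      = (List.range grid.length).flatMap
          (fun c => (List.range grid.length).flatMap (fun r => pvPick grid r c)) := by
  unfold getStringWithUppers_alt
  simp only [PySem.List.pyRange_zero_nat, List.foldl_map, List.map_map,
             PySem.List.pyGetD_natCast, Int.toNat_natCast, Function.comp_def]
  simp only [show ∀ (r c : Nat), (grid.getD r []).getD c "" = pvCell grid r c from fun _ _ => rfl]
  rw [pv_bouter grid grid.length le_rfl]
  rw [PySem.Str.toList_join]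
  simp only [List.map_map, Function.comp_def, PySem.Str.toList_join]
  have hsep : ("" : String).toList = [] := by simp
  rw [hsep]
  simp only [pv_join_nil]
  congr 1
  apply List.map_congr_left
  intro c _
  exact pv_col grid c (List.range grid.length)

-- ===== VERDICT (by name: the statement is the Claim_ definition above) =====
theorem getStringWithUppers_spec : Claim_equal_getStringWithUppers := by
  intro grid _ _
  unfold Spec_getStringWithUppers
  rw [← String.toList_inj, pv_A_chars, pv_B_chars]
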